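-- pv_equiv track=rewrite | github.com/KatyukaPinched/compressers | BWT_MTF_RLE_HA.py | compress
-- ===== SOURCE A (Python) =====
-- def compress(data, codes):
--     bits = []
--     summ = 0
--     bit = 0
--     for symbol in data:
--         for c in codes[symbol]:
--             if c == '1':
--                 summ |= (1 << bit)
--             bit += 1
--             if bit == 8:
--                 bits.append(summ)
--                 summ = 0
--                 bit = 0
--
--     if bit > 1:
--         bits.append(summ)
--     return bits
-- ===== SOURCE B (Python) =====
-- def _pack(chunk):
--     byte = 0
--     for j, c in enumerate(chunk):
--         if c == '1':
--             byte |= 1 << j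
--     return byte
--
--
-- def compress(data, codes):
--     # materialize the whole bit-string, then consume it in 8-bit chunks
--     s = ''.join(codes[symbol] for symbol in data)
--     out = []
--     while len(s) >= 8:
--         out.append(_pack(s[:8]))
--         s = s[8:]
--     if len(s) > 1:
--         out.append(_pack(s))
--     return out
-- ===== Notes on version B (the rewrite author's own statement) =====
-- stated objective: alternative
-- what changed: A streams every bit through one interleaved accumulator (summ/bit counters updated per character inside nested loops); B first materializes the whole bit-string by joining the code words and then consumes it in complete 8-bit chunks, packing each chunk into a byte with a separate helper, with the same >1-bit rule for the final partial chunk.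
import Mathlib
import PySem

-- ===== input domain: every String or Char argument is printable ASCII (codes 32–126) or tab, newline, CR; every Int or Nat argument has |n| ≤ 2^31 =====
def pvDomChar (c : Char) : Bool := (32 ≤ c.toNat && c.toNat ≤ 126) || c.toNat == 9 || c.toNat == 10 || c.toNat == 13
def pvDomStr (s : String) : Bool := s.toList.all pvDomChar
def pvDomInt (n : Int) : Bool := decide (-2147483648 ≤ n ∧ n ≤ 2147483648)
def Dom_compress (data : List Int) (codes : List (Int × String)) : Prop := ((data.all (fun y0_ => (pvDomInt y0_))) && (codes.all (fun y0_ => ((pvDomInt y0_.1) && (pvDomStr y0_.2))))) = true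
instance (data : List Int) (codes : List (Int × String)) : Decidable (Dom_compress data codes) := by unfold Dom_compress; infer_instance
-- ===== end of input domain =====

-- B materializes the full bit-string and packs it chunk by chunk, instead of A's
-- interleaved per-character accumulator; objective: alternative decomposition.

-- shared lookup helper: codes[symbol] as a char list (dict lookup; "" only used outside Pre_)
def pvCode (codes : List (Int × String)) (symbol : Int) : List Char :=
  ((PySem.Dict.ofList codes).getD symbol "").toList

-- ===== PORT A =====
-- one character step of A's inner loop over state (bits, summ, bit)
def stepA (st : List Int × Int × Nat) (c : Char) : List Int × Int × Nat :=
  let summ := if c = '1' then PySem.Int.bor st.2.1 ((1 : Int) <<< st.2.2) else st.2.1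
  let bit := st.2.2 + 1
  if bit == 8 then (st.1 ++ [summ], 0, 0) else (st.1, summ, bit)

def compress (data : List Int) (codes : List (Int × String)) : List Int :=
  let st := data.foldl (fun st symbol => (pvCode codes symbol).foldl stepA st) ([], 0, 0)
  if st.2.2 > 1 then st.1 ++ [st.2.1] else st.1

-- ===== PORT B =====
-- _pack: OR together 1 <<< j for every '1' at position j of the chunk
def packGo : List Char → Nat → Int → Int
  | [], _, acc => acc
  | c :: cs, j, acc => packGo cs (j + 1) (if c = '1' then PySem.Int.bor acc ((1 : Int) <<< j) else acc)

def pack (chunk : List Char) : Int := packGo chunk 0 0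

-- the while-loop of B: consume complete 8-char chunks, then the >1-bit remainder
def chunkLoop (s : List Char) (out : List Int) : List Int :=
  if _h : 8 ≤ s.length then chunkLoop (s.drop 8) (out ++ [pack (s.take 8)])
  else if 1 < s.length then out ++ [pack s] else out
termination_by s.length
decreasing_by simp; omega

def compress_alt (data : List Int) (codes : List (Int × String)) : List Int :=
  let s := data.flatMap (pvCode codes)
  chunkLoop s []

-- ===== PRECONDITION & SPEC =====
-- Pre_: A raises KeyError when some symbol of data has no code; excluded.
def Pre_compress (data : List Int) (codes : List (Int × String)) : Prop :=
  ∀ symbol ∈ data, ((PySem.Dict.ofList codes).get? symbol).isSome = true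
instance (data : List Int) (codes : List (Int × String)) : Decidable (Pre_compress data codes) := by unfold Pre_compress; infer_instance
def pvWitness_compress : List Int × (List (Int × String)) := ([0, 1, 0], [(0, "10"), (1, "01101")])

def Spec_compress (data : List Int) (codes : List (Int × String)) (out : List Int) : Prop := out = compress_alt data codes
instance (data : List Int) (codes : List (Int × String)) (out : List Int) : Decidable (Spec_compress data codes out) := by unfold Spec_compress; infer_instance

-- ===== CLAIM (what is proved, stated in full; the proofs are below) =====
def Claim_equal_compress : Prop := ∀ (data : List Int) (codes : List (Int × String)), Dom_compress data codes → Pre_compress data codes → Spec_compress data codes (compress data codes)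

-- ===== LEMMAS AND PROOFS =====

-- A's nested loops are one streaming pass over the concatenated bit-string
theorem foldl_stepA_flatMap (f : Int → List Char) :
    ∀ (data : List Int) (st : List Int × Int × Nat),
      data.foldl (fun st symbol => (f symbol).foldl stepA st) st
        = (data.flatMap f).foldl stepA st := by
  intro data
  induction data with
  | nil => intro st; simp
  | cons x xs ih => intro st; simp [List.foldl_append, ih]

-- main invariant: finishing A's stream from (bits, 0, 0) is B's chunk loop
theorem stream_eq_chunk : ∀ (s : List Char) (bits : List Int),
    (let st := s.foldl stepA (bits, 0, 0);
     if st.2.2 > 1 then st.1 ++ [st.2.1] else st.1) = chunkLoop s bits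
  | c0 :: c1 :: c2 :: c3 :: c4 :: c5 :: c6 :: c7 :: rest, bits => by
      have ih := stream_eq_chunk rest (bits ++ [pack [c0, c1, c2, c3, c4, c5, c6, c7]])
      have h8 : List.foldl stepA (bits, 0, 0) (c0 :: c1 :: c2 :: c3 :: c4 :: c5 :: c6 :: c7 :: rest)
          = List.foldl stepA (bits ++ [pack [c0, c1, c2, c3, c4, c5, c6, c7]], 0, 0) rest := by
        simp [stepA, pack, packGo]
      rw [chunkLoop, dif_pos (by simp [List.length_cons])]
      simp only [List.take_succ_cons, List.take_zero, List.drop_succ_cons, List.drop_zero]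
      rw [← ih]
      simp only [h8]
  | [], bits => by rw [chunkLoop]; simp
  | [c0], bits => by rw [chunkLoop]; simp [stepA]
  | [c0, c1], bits => by rw [chunkLoop]; simp [stepA, pack, packGo]
  | [c0, c1, c2], bits => by rw [chunkLoop]; simp [stepA, pack, packGo]
  | [c0, c1, c2, c3], bits => by rw [chunkLoop]; simp [stepA, pack, packGo]
  | [c0, c1, c2, c3, c4], bits => by rw [chunkLoop]; simp [stepA, pack, packGo]
  | [c0, c1, c2, c3, c4, c5], bits => by rw [chunkLoop]; simp [stepA, pack, packGo]
  | [c0, c1, c2, c3, c4, c5, c6], bits => by rw [chunkLoop]; simp [stepA, pack, packGo]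
termination_by s _ => s.length

-- ===== VERDICT (by name: the statement is the Claim_ definition above) =====
theorem compress_spec : Claim_equal_compress := by
  intro data codes _ _
  unfold Spec_compress compress compress_alt
  rw [foldl_stepA_flatMap]
  exact stream_eq_chunk (data.flatMap (pvCode codes)) []
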